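-- pv_equiv track=rewrite | github.com/sofiboselli/EDIN01-Project-3 | project3.py | shiftRegister
-- ===== SOURCE A (Python) =====
-- def shiftRegister(C, N, init):
-- 	# C is a list of the coefficients of the LFSR
-- 	# N is the number of output desired
-- 	# init is a list of the initial state of the LFSR
-- 	out = []
-- 	current = init.copy()
-- 	while len(out) < N:
-- 		add = 0
-- 		for coeff_id,coeff in enumerate(C):
-- 			add += coeff*current[coeff_id]
-- 		current.append(add%2)
-- 		out.append(current[0])
-- 		current.pop(0)
-- 	return out
-- ===== SOURCE B (Python) =====
-- def shiftRegister(C, N, init):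
--     # Build the whole LFSR stream in one growing buffer with absolute
--     # indexing, then gather the first N bits at the end.
--     s = init.copy()
--     for t in range(N):
--         add = 0
--         for i in range(len(C)):
--             add += C[i] * s[t + i]
--         s.append(add % 2)
--     return [s[t] for t in range(N)]
-- ===== Notes on version B (the rewrite author's own statement) =====
-- stated objective: simpler
-- what changed: Replaces the mutated sliding window (append + front-read + pop(0)) with an immutable ever-growing buffer indexed absolutely, plus a final gather comprehension.
import Mathlib
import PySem

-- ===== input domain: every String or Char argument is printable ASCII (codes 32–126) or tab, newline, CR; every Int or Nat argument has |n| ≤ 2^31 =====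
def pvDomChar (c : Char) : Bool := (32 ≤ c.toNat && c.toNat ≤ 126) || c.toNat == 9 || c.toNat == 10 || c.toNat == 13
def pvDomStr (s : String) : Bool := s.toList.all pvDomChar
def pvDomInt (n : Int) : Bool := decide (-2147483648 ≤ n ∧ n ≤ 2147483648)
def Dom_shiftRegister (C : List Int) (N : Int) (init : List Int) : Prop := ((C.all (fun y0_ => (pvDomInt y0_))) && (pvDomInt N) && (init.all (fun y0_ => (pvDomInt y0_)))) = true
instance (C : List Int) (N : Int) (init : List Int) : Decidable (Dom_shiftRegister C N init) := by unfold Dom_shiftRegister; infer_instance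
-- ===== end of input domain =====

-- B replaces A's mutated sliding window (append + front-read + pop(0)) by an
-- immutable ever-growing buffer indexed absolutely, with a final gather.


-- ===== PORT A =====
-- while len(out) < N: each pass appends one element to `out`, so the loop runs
-- exactly N.toNat times; `current[coeff_id]` / `current[0]` are in range on Pre_.
def shiftRegisterGo (C : List Int) : Nat → List Int → List Int → List Int
  | 0, _, out => out
  | fuel + 1, current, out =>
    let add := (PySem.List.enumerate C).foldl
      (fun a p => a + p.2 * PySem.List.pyGetD current p.1 0) 0
    let current2 := current ++ [PySem.Int.mod add 2]
    let out2 := out ++ [PySem.List.pyGetD current2 0 0]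
    shiftRegisterGo C fuel (current2.drop 1) out2   -- current.pop(0)

def shiftRegister (C : List Int) (N : Int) (init : List Int) : List Int :=
  shiftRegisterGo C N.toNat init []

-- ===== PORT B =====
-- add = sum over i in range(len(C)) of C[i]*s[t+i]
def lfsrAdd (C : List Int) (s : List Int) (t : Int) : Int :=
  (PySem.List.pyRange 0 (C.length : Int) 1).foldl
    (fun a i => a + PySem.List.pyGetD C i 0 * PySem.List.pyGetD s (t + i) 0) 0

def shiftRegister_alt (C : List Int) (N : Int) (init : List Int) : List Int :=
  let s := (PySem.List.pyRange 0 N 1).foldl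
    (fun s t => s ++ [PySem.Int.mod (lfsrAdd C s t) 2]) init
  (PySem.List.pyRange 0 N 1).map (fun t => PySem.List.pyGetD s t 0)

-- ===== PRECONDITION & SPEC =====
-- Pre_ excludes exactly the inputs where the Python A raises IndexError
-- (N > 0 with len(C) > len(init)); B raises IndexError there too.
def Pre_shiftRegister (C : List Int) (N : Int) (init : List Int) : Prop :=
  N ≤ 0 ∨ C.length ≤ init.length
instance (C : List Int) (N : Int) (init : List Int) : Decidable (Pre_shiftRegister C N init) := by
  unfold Pre_shiftRegister; infer_instance

def pvWitness_shiftRegister : List Int × Int × List Int := ([1, 1], 5, [1, 0])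

def Spec_shiftRegister (C : List Int) (N : Int) (init : List Int) (out : List Int) : Prop :=
  out = shiftRegister_alt C N init
instance (C : List Int) (N : Int) (init : List Int) (out : List Int) : Decidable (Spec_shiftRegister C N init out) := by
  unfold Spec_shiftRegister; infer_instance

-- ===== CLAIM (what is proved, stated in full; the proofs are below) =====
def Claim_equal_shiftRegister : Prop := ∀ (C : List Int) (N : Int) (init : List Int), Dom_shiftRegister C N init → Pre_shiftRegister C N init → Spec_shiftRegister C N init (shiftRegister C N init)

-- ===== LEMMAS AND PROOFS =====

-- the stream B builds, as a structural recursion on the number of steps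
def lfsrS (C init : List Int) : Nat → List Int
  | 0 => init
  | n + 1 => lfsrS C init n ++ [PySem.Int.mod (lfsrAdd C (lfsrS C init n) n) 2]

lemma length_lfsrS (C init : List Int) (n : Nat) :
    (lfsrS C init n).length = init.length + n := by
  induction n with
  | zero => rfl
  | succ n ih => simp [lfsrS, ih]; omega

lemma foldl_eq_lfsrS (C init : List Int) (n : Nat) :
    (PySem.List.pyRange 0 (n : Int) 1).foldl
      (fun s t => s ++ [PySem.Int.mod (lfsrAdd C s t) 2]) init = lfsrS C init n := by
  induction n with
  | zero => simp [PySem.List.pyRange_one_eq_nil, lfsrS]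
  | succ n ih =>
    have h : ((n + 1 : Nat) : Int) = (n : Int) + 1 := by push_cast; ring
    rw [h, PySem.List.pyRange_one_succ_right (Int.natCast_nonneg n), List.foldl_append,
        List.foldl_cons, List.foldl_nil, ih]
    rfl

lemma getD_lfsrS_stable (C init : List Int) (j m n : Nat)
    (hj : j < init.length + n) (hmn : n ≤ m) :
    (lfsrS C init m).getD j 0 = (lfsrS C init n).getD j 0 := by
  induction m with
  | zero =>
    have hn : n = 0 := by omega
    simp [hn]
  | succ m ih =>
    rcases Nat.lt_or_ge n (m + 1) with h | h
    · have hm : n ≤ m := by omega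
      rw [← ih hm]
      have hjm : j < (lfsrS C init m).length := by rw [length_lfsrS]; omega
      simp [lfsrS, List.getD_eq_getElem?_getD, List.getElem?_append_left hjm]
    · have : n = m + 1 := by omega
      simp [this]

lemma getD_drop_add (s : List Int) (t k : Nat) :
    (s.drop t).getD k 0 = s.getD (t + k) 0 := by
  simp [List.getD_eq_getElem?_getD, List.getElem?_drop]

lemma add_eq (C s : List Int) (t : Nat) (_h : C.length + t ≤ s.length) :
    (PySem.List.enumerate C).foldl
      (fun a p => a + p.2 * PySem.List.pyGetD (s.drop t) p.1 0) 0 = lfsrAdd C s (t : Int) := by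
  rw [PySem.List.enumerate_eq_map_pyRange C 0, List.foldl_map]
  unfold lfsrAdd
  simp only [PySem.List.len_eq]
  apply PySem.List.foldl_congr_mem
  intro a i hi
  rw [PySem.List.mem_pyRange_one] at hi
  have hi' : i = (i.toNat : Int) := by omega
  rw [hi', PySem.List.pyGetD_natCast, PySem.List.pyGetD_natCast, ← Nat.cast_add,
      PySem.List.pyGetD_natCast, getD_drop_add]

lemma go_lfsrS (C init : List Int) (hC : C.length ≤ init.length) :
    ∀ (fuel t : Nat) (out : List Int),
    shiftRegisterGo C fuel ((lfsrS C init t).drop t) out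
      = out ++ (List.range fuel).map (fun k => (lfsrS C init (t + k + 1)).getD (t + k) 0) := by
  intro fuel
  induction fuel with
  | zero => intro t out; simp [shiftRegisterGo]
  | succ fuel ih =>
    intro t out
    rw [shiftRegisterGo]
    have hlen : (lfsrS C init t).length = init.length + t := length_lfsrS C init t
    have hadd : (PySem.List.enumerate C).foldl
        (fun a p => a + p.2 * PySem.List.pyGetD ((lfsrS C init t).drop t) p.1 0) 0
        = lfsrAdd C (lfsrS C init t) (t : Int) :=
      add_eq C (lfsrS C init t) t (by omega)
    have hcur2 : (lfsrS C init t).drop t ++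
        [PySem.Int.mod (lfsrAdd C (lfsrS C init t) (t : Int)) 2] = (lfsrS C init (t + 1)).drop t := by
      rw [lfsrS, List.drop_append_of_le_length (by omega)]
    simp only [hadd, hcur2]
    have hhead : PySem.List.pyGetD ((lfsrS C init (t + 1)).drop t) 0 0
        = (lfsrS C init (t + 1)).getD t 0 := by
      rw [PySem.List.pyGetD_zero, List.getD_eq_getElem?_getD, List.getD_eq_getElem?_getD,
          List.getElem?_drop]
      norm_num
    have hdrop1 : ((lfsrS C init (t + 1)).drop t).drop 1 = (lfsrS C init (t + 1)).drop (t + 1) := by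
      rw [List.drop_drop]
    rw [hhead, hdrop1, ih (t + 1)]
    rw [List.append_assoc, List.singleton_append, List.range_succ_eq_map, List.map_cons,
        List.map_map]
    congr 1
    refine List.cons_eq_cons.mpr ⟨by norm_num, ?_⟩
    apply List.map_congr_left
    intro k _
    simp only [Function.comp]
    rw [show t + 1 + k = t + (k + 1) from by omega]

-- ===== VERDICT (by name: the statement is the Claim_ definition above) =====
theorem shiftRegister_spec : Claim_equal_shiftRegister := by
  intro C N init _ hpre
  unfold Spec_shiftRegister shiftRegister shiftRegister_alt
  by_cases hN : N ≤ 0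
  · have h0 : N.toNat = 0 := by omega
    rw [h0, PySem.List.pyRange_one_eq_nil hN]
    simp [shiftRegisterGo]
  · have hC : C.length ≤ init.length := by
      cases hpre with
      | inl h => omega
      | inr h => exact h
    have hNc : N = (N.toNat : Int) := by omega
    rw [hNc]
    simp only [Int.toNat_natCast, foldl_eq_lfsrS]
    have hA := go_lfsrS C init hC N.toNat 0 []
    simp only [Nat.zero_add, show lfsrS C init 0 = init from rfl, List.drop_zero] at hA
    rw [hA, PySem.List.pyRange_one]
    simp only [List.map_map, List.nil_append, Int.sub_zero, Int.toNat_natCast]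
    apply List.map_congr_left
    intro k hk
    rw [List.mem_range] at hk
    simp only [Function.comp, zero_add, PySem.List.pyGetD_natCast]
    rw [getD_lfsrS_stable C init k N.toNat (k + 1) (by omega) (by omega)]
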